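-- pv_equiv track=rewrite | github.com/ChrisSwinchatt/Qwoppy | qwoppy/ocr.py | to_indices
-- ===== SOURCE A (Python) =====
-- class Constants:
--     TOKENS          = ['\t', '.', '-', ' ', '0', '1', '2', '3', '4', '5', '6', '7', '8', '9', 'e', 'm', 'r', 's', 't', '\n']
--     SEQUENCE_LENGTH = 20
--     NUM_TOKENS      = len(TOKENS)
--     START           = TOKENS.index('\t')
--     STOP            = TOKENS.index('\n')
--
-- def to_indices(sentence, pad=False):
--     indices = []
--     for c in sentence:
--         if c not in Constants.TOKENS:
--             continue
--         indices.append(Constants.TOKENS.index(c))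
--         if c == Constants.TOKENS[Constants.STOP]:
--             break
--     if pad:
--         while len(indices) < Constants.SEQUENCE_LENGTH:
--             indices.append(Constants.STOP)
--     return indices
-- ===== SOURCE B (Python) =====
-- class Constants:
--     TOKENS          = ['\t', '.', '-', ' ', '0', '1', '2', '3', '4', '5', '6', '7', '8', '9', 'e', 'm', 'r', 's', 't', '\n']
--     SEQUENCE_LENGTH = 20
--     NUM_TOKENS      = len(TOKENS)
--     START           = TOKENS.index('\t')
--     STOP            = TOKENS.index('\n')
--
-- def to_indices(sentence, pad=False):
--     t = Constants.TOKENS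
--     mapped = [t.index(c) for c in sentence if c in t]
--     if Constants.STOP in mapped:
--         mapped = mapped[:mapped.index(Constants.STOP) + 1]
--     if pad:
--         mapped += [Constants.STOP] * (Constants.SEQUENCE_LENGTH - len(mapped))
--     return mapped
-- ===== Notes on version B (the rewrite author's own statement) =====
-- stated objective: simpler
-- what changed: Replaces A's single early-breaking scan (skip/append/break inside one loop) by a map-all-valid-chars comprehension followed by an inclusive truncation at the first STOP token and arithmetic padding via list multiplication instead of a while loop.
import Mathlib
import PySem

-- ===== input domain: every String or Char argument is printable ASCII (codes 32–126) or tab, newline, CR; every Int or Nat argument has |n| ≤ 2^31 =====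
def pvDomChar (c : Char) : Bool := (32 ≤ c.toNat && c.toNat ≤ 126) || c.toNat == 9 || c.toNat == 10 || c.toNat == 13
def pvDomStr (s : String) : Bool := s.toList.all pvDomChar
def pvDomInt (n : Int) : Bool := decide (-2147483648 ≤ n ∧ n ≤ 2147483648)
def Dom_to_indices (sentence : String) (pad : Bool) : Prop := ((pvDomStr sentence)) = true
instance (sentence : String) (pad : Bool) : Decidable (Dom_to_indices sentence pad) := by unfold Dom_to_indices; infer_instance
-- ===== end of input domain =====

-- B maps all valid chars then truncates inclusively at the first STOP and pads arithmetically;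
-- simpler decomposition than A's early-breaking scan, same results everywhere.


-- ===== PORT A =====
-- Constants.TOKENS
def pvTokens : List Char :=
  ['\t', '.', '-', ' ', '0', '1', '2', '3', '4', '5', '6', '7', '8', '9', 'e', 'm', 'r', 's', 't', '\n']

-- A's while-loop: while len(indices) < 20: indices.append(STOP)
def pvPadLoop (xs : List Int) : List Int :=
  if xs.length < 20 then pvPadLoop (xs ++ [(19 : Int)]) else xs
termination_by 20 - xs.length
decreasing_by simp; omega

-- A's for-loop over the sentence: skip invalid chars, append TOKENS.index(c),
-- break after the STOP char (TOKENS[STOP] = '\n'; .index on a member = idxOf).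
def pvScanA : List Char → List Int
  | [] => []
  | c :: rest =>
    if c ∈ pvTokens then
      (pvTokens.idxOf c : Int) :: (if c = '\n' then [] else pvScanA rest)
    else pvScanA rest

def to_indices (sentence : String) (pad : Bool) : List Int :=
  let indices := pvScanA sentence.toList
  if pad then pvPadLoop indices else indices

-- ===== PORT B =====
def to_indices_alt (sentence : String) (pad : Bool) : List Int :=
  let mapped := (sentence.toList.filter (fun c => c ∈ pvTokens)).map
      (fun c => (pvTokens.idxOf c : Int))
  let mapped := if (19 : Int) ∈ mapped then mapped.take (mapped.idxOf 19 + 1) else mapped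
  if pad then mapped ++ List.replicate (20 - mapped.length) (19 : Int) else mapped

-- ===== PRECONDITION & SPEC =====
def Spec_to_indices (sentence : String) (pad : Bool) (out : List Int) : Prop := out = to_indices_alt sentence pad
instance (sentence : String) (pad : Bool) (out : List Int) : Decidable (Spec_to_indices sentence pad out) := by unfold Spec_to_indices; infer_instance

-- ===== CLAIM (what is proved, stated in full; the proofs are below) =====
def Claim_equal_to_indices : Prop := ∀ (sentence : String) (pad : Bool), Dom_to_indices sentence pad → Spec_to_indices sentence pad (to_indices sentence pad)

-- ===== LEMMAS AND PROOFS =====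

-- B's truncation step, as a function for the proofs
def pvTrunc (m : List Int) : List Int :=
  if (19 : Int) ∈ m then m.take (m.idxOf 19 + 1) else m

lemma pvIdx_ne_19 (c : Char) (hc : c ∈ pvTokens) (hn : c ≠ '\n') :
    (pvTokens.idxOf c : Int) ≠ 19 := by
  fin_cases hc <;> simp_all <;> decide

lemma pvTrunc_cons_ne (a : Int) (m : List Int) (ha : a ≠ 19) :
    pvTrunc (a :: m) = a :: pvTrunc m := by
  unfold pvTrunc
  by_cases h : (19 : Int) ∈ m
  · have : (19 : Int) ∈ a :: m := List.mem_cons_of_mem _ h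
    simp [this, h, ha]
  · have : ¬ (19 : Int) ∈ a :: m := by
      simp [List.mem_cons, h, Ne.symm ha]
    simp [this, h]

lemma pvScanA_eq_trunc (cs : List Char) :
    pvScanA cs = pvTrunc ((cs.filter (fun c => c ∈ pvTokens)).map
      (fun c => (pvTokens.idxOf c : Int))) := by
  induction cs with
  | nil => simp [pvScanA, pvTrunc]
  | cons c rest ih =>
    by_cases hc : c ∈ pvTokens
    · by_cases hn : c = '\n'
      · subst hn
        have h19 : (pvTokens.idxOf '\n' : Int) = 19 := by decide
        simp [pvScanA, hc, h19, pvTrunc]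
      · have hne : (pvTokens.idxOf c : Int) ≠ 19 := pvIdx_ne_19 c hc hn
        rw [show (c :: rest).filter (fun c => decide (c ∈ pvTokens)) =
              c :: rest.filter (fun c => decide (c ∈ pvTokens)) by simp [hc]]
        rw [List.map_cons, pvTrunc_cons_ne _ _ hne, ← ih]
        simp [pvScanA, hc, hn]
    · simp [pvScanA, hc, ih]

lemma pvPadLoop_eq (xs : List Int) :
    pvPadLoop xs = xs ++ List.replicate (20 - xs.length) (19 : Int) := by
  have aux : ∀ n (xs : List Int), 20 - xs.length ≤ n →
      pvPadLoop xs = xs ++ List.replicate (20 - xs.length) (19 : Int) := by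
    intro n
    induction n with
    | zero =>
      intro xs h
      have : ¬ xs.length < 20 := by omega
      rw [pvPadLoop]
      simp [this]; omega
    | succ n ih =>
      intro xs h
      by_cases hl : xs.length < 20
      · rw [pvPadLoop]
        rw [if_pos hl, ih (xs ++ [(19 : Int)]) (by simp; omega)]
        have h1 : 20 - (xs ++ [(19 : Int)]).length = 20 - xs.length - 1 := by simp; omega
        have h2 : 20 - xs.length = (20 - xs.length - 1) + 1 := by omega
        rw [h1, List.append_assoc, h2, List.replicate_succ]
        simp
      · rw [pvPadLoop]
        simp [hl]; omega
  exact aux (20 - xs.length) xs le_rfl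

-- ===== VERDICT (by name: the statement is the Claim_ definition above) =====
theorem to_indices_spec : Claim_equal_to_indices := by
  intro sentence pad _
  unfold Spec_to_indices to_indices to_indices_alt
  rw [pvScanA_eq_trunc]
  cases pad with
  | false => simp [pvTrunc]
  | true => rw [if_pos rfl, if_pos rfl, pvPadLoop_eq]; simp [pvTrunc]
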